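-- pv_equiv track=rewrite | github.com/ahmettlevent/isu2019-2020odevler | ödevler lab.zip/190701134_LAB8/190701134_LAB8.py | identifier_check
-- ===== SOURCE A (Python) =====
-- istenmeyen_karakter ="!,',^,+,%,&,/,(,),[,],{,},é,=,?,*,>,<,|,$,ç,ı,ü,ğ,ö,ş,İ,Ğ,Ü,Ö,Ş,Ç, ,"
--
-- istenen_karakter ="ABCDEFZHIKLMNOPQRSTVX,1,2,3,4,5,6,7,8,9,"
--
-- def identifier_check(a):
--     if a[0] == "_" or a[0].isalpha() == True :
--         for i in range(len(istenmeyen_karakter)):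
--             if (istenmeyen_karakter[i] in a) :
--                 return False
--         for i in range(len(istenen_karakter)):
--             if ( istenen_karakter[i] in a ) or ( istenen_karakter[i].lower() in a ) or ("_" in a):
--                 return True
--     else:
--         return False
-- ===== SOURCE B (Python) =====
-- _FORBIDDEN = frozenset("!',^+%&/()[]{}\u00e9=?*><|$\u00e7\u0131\u00fc\u011f\u00f6\u015f\u0130\u011e\u00dc\u00d6\u015e\u00c7 ,")
-- _ALLOWED = frozenset("ABCDEFZHIKLMNOPQRSTVXabcdefzhiklmnopqrstvx123456789_")
--
-- def identifier_check(a):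
--     if a[0] != "_" and not a[0].isalpha():
--         return False
--     chars = set(a)
--     if chars & _FORBIDDEN:
--         return False
--     if chars & _ALLOWED:
--         return True
--     return None
-- ===== Notes on version B (the rewrite author's own statement) =====
-- stated objective: simpler
-- what changed: B precomputes the forbidden and allowed character sets once and tests them against set(a) with two set intersections, traversing the characters of a instead of running A's two index loops over the constant strings with substring searches.
import Mathlib
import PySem

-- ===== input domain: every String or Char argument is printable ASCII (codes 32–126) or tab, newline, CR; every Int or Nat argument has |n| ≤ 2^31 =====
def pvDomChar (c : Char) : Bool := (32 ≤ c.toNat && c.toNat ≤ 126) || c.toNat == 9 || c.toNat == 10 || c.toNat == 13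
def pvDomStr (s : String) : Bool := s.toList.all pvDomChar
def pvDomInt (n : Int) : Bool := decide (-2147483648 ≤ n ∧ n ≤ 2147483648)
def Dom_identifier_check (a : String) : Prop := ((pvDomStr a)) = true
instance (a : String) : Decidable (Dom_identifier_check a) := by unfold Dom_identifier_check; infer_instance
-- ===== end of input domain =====

set_option maxRecDepth 4000


-- B replaces the two scans over the constant character strings by one pass over set(a)
-- intersected with two precomputed character sets (objective: simpler).

-- ===== PORT A =====
def istenmeyen_karakter : String := "!,',^,+,%,&,/,(,),[,],{,},é,=,?,*,>,<,|,$,ç,ı,ü,ğ,ö,ş,İ,Ğ,Ü,Ö,Ş,Ç, ,"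

def istenen_karakter : String := "ABCDEFZHIKLMNOPQRSTVX,1,2,3,4,5,6,7,8,9,"

-- second 'for' loop of A: first match returns True, falling off returns None
def identifier_check_loop2 (al : List Char) : List Int → Option Bool
  | [] => none
  | i :: rest =>
    if PySem.Chars.isIn [PySem.List.pyGetD istenen_karakter.toList i ' '] al
        || PySem.Chars.isIn (PySem.Chars.lower [PySem.List.pyGetD istenen_karakter.toList i ' ']) al
        || PySem.Chars.isIn ['_'] al
    then some true else identifier_check_loop2 al rest

-- first 'for' loop of A: first match returns False, falling off runs the second loop
def identifier_check_loop1 (al : List Char) : List Int → Option Bool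
  | [] => identifier_check_loop2 al (PySem.List.pyRange 0 (PySem.Str.len istenen_karakter) 1)
  | i :: rest =>
    if PySem.Chars.isIn [PySem.List.pyGetD istenmeyen_karakter.toList i ' '] al
    then some false else identifier_check_loop1 al rest

def identifier_check (a : String) : Option Bool :=
  match PySem.Str.pyGet? a 0 with
  | none => none  -- a[0] raises IndexError on empty a (outside Pre_)
  | some c0 =>
    if c0 = '_' || PySem.Chars.strIsalpha [c0] then
      identifier_check_loop1 a.toList (PySem.List.pyRange 0 (PySem.Str.len istenmeyen_karakter) 1)
    else some false

-- ===== PORT B =====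
def pvForbidden : PySem.Set Char := PySem.Set.ofList "!',^+%&/()[]{}é=?*><|$çıüğöşİĞÜÖŞÇ ,".toList

def pvAllowed : PySem.Set Char := PySem.Set.ofList "ABCDEFZHIKLMNOPQRSTVXabcdefzhiklmnopqrstvx123456789_".toList

def identifier_check_alt (a : String) : Option Bool :=
  match PySem.Str.pyGet? a 0 with
  | none => none  -- a[0] raises IndexError on empty a (outside Pre_)
  | some c0 =>
    if c0 ≠ '_' && !PySem.Chars.strIsalpha [c0] then some false
    else
      let chars := PySem.Set.ofList a.toList
      if PySem.Set.len (PySem.Set.inter chars pvForbidden) ≠ 0 then some false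
      else if PySem.Set.len (PySem.Set.inter chars pvAllowed) ≠ 0 then some true
      else none

-- ===== PRECONDITION & SPEC =====
-- Pre_ excludes only the empty string, on which A's a[0] raises IndexError.
def Pre_identifier_check (a : String) : Prop := a ≠ ""
instance (a : String) : Decidable (Pre_identifier_check a) := by unfold Pre_identifier_check; infer_instance

def pvWitness_identifier_check : String := "ab_1"

def Spec_identifier_check (a : String) (out : Option Bool) : Prop := out = identifier_check_alt a
instance (a : String) (out : Option Bool) : Decidable (Spec_identifier_check a out) := by unfold Spec_identifier_check; infer_instance

-- ===== CLAIM (what is proved, stated in full; the proofs are below) =====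
def Claim_equal_identifier_check : Prop := ∀ (a : String), Dom_identifier_check a → Pre_identifier_check a → Spec_identifier_check a (identifier_check a)

-- ===== LEMMAS AND PROOFS =====


-- literal forms of the four constant character lists (proved once, cited below)
theorem pv_lit_imy : istenmeyen_karakter.toList = ['!', ',', '\'', ',', '^', ',', '+', ',', '%', ',', '&', ',', '/', ',', '(', ',', ')', ',', '[', ',', ']', ',', '{', ',', '}', ',', 'é', ',', '=', ',', '?', ',', '*', ',', '>', ',', '<', ',', '|', ',', '$', ',', 'ç', ',', 'ı', ',', 'ü', ',', 'ğ', ',', 'ö', ',', 'ş', ',', 'İ', ',', 'Ğ', ',', 'Ü', ',', 'Ö', ',', 'Ş', ',', 'Ç', ',', ' ', ','] := by decide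

theorem pv_lit_ist : istenen_karakter.toList = ['A', 'B', 'C', 'D', 'E', 'F', 'Z', 'H', 'I', 'K', 'L', 'M', 'N', 'O', 'P', 'Q', 'R', 'S', 'T', 'V', 'X', ',', '1', ',', '2', ',', '3', ',', '4', ',', '5', ',', '6', ',', '7', ',', '8', ',', '9', ','] := by decide

theorem pv_lit_forb : pvForbidden = ['!', '\'', ',', '^', '+', '%', '&', '/', '(', ')', '[', ']', '{', '}', 'é', '=', '?', '*', '>', '<', '|', '$', 'ç', 'ı', 'ü', 'ğ', 'ö', 'ş', 'İ', 'Ğ', 'Ü', 'Ö', 'Ş', 'Ç', ' '] := by decide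

theorem pv_lit_allow : pvAllowed = ['A', 'B', 'C', 'D', 'E', 'F', 'Z', 'H', 'I', 'K', 'L', 'M', 'N', 'O', 'P', 'Q', 'R', 'S', 'T', 'V', 'X', 'a', 'b', 'c', 'd', 'e', 'f', 'z', 'h', 'i', 'k', 'l', 'm', 'n', 'o', 'p', 'q', 'r', 's', 't', 'v', 'x', '1', '2', '3', '4', '5', '6', '7', '8', '9', '_'] := by decide

theorem pvF1 : ∀ c ∈ istenmeyen_karakter.toList, c ∈ pvForbidden := by
  have h : istenmeyen_karakter.toList.all (fun c => decide (c ∈ pvForbidden)) = true := by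
    rw [pv_lit_imy, pv_lit_forb]; rfl
  intro c hc; exact decide_eq_true_eq.mp (List.all_eq_true.mp h c hc)

theorem pvF2 : ∀ c ∈ pvForbidden, c ∈ istenmeyen_karakter.toList := by
  have h : pvForbidden.all (fun c => decide (c ∈ istenmeyen_karakter.toList)) = true := by
    rw [pv_lit_imy, pv_lit_forb]; rfl
  intro c hc; exact decide_eq_true_eq.mp (List.all_eq_true.mp h c hc)

theorem pvF3 : ∀ c ∈ istenen_karakter.toList, c = ',' ∨ c ∈ pvAllowed := by
  have h : istenen_karakter.toList.all (fun c => c == ',' || decide (c ∈ pvAllowed)) = true := by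
    rw [pv_lit_ist, pv_lit_allow]; rfl
  intro c hc
  rcases (Bool.or_eq_true _ _).mp (List.all_eq_true.mp h c hc) with h' | h'
  · exact Or.inl (beq_iff_eq.mp h')
  · exact Or.inr (decide_eq_true_eq.mp h')

theorem pvF4 : ∀ c ∈ istenen_karakter.toList, c = ',' ∨ PySem.Chars.lowerChar c ∈ pvAllowed := by
  have h : istenen_karakter.toList.all
      (fun c => c == ',' || decide (PySem.Chars.lowerChar c ∈ pvAllowed)) = true := by
    rw [pv_lit_ist, pv_lit_allow]; rfl
  intro c hc
  rcases (Bool.or_eq_true _ _).mp (List.all_eq_true.mp h c hc) with h' | h'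
  · exact Or.inl (beq_iff_eq.mp h')
  · exact Or.inr (decide_eq_true_eq.mp h')

theorem pvF5 : ∀ x ∈ pvAllowed, x = '_' ∨ x ∈ istenen_karakter.toList ∨
    ∃ u ∈ istenen_karakter.toList, PySem.Chars.lowerChar u = x := by
  have h : pvAllowed.all (fun x => x == '_' || decide (x ∈ istenen_karakter.toList)
      || istenen_karakter.toList.any (fun u => PySem.Chars.lowerChar u == x)) = true := by
    rw [pv_lit_ist, pv_lit_allow]; rfl
  intro x hx
  rcases (Bool.or_eq_true _ _).mp (List.all_eq_true.mp h x hx) with h' | h'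
  · rcases (Bool.or_eq_true _ _).mp h' with h2 | h2
    · exact Or.inl (beq_iff_eq.mp h2)
    · exact Or.inr (Or.inl (decide_eq_true_eq.mp h2))
  · obtain ⟨u, hu, hb⟩ := List.any_eq_true.mp h'
    exact Or.inr (Or.inr ⟨u, hu, beq_iff_eq.mp hb⟩)

-- single-character membership: 'c in a' is list membership
theorem pv_isIn_singleton (c : Char) (al : List Char) :
    PySem.Chars.isIn [c] al = true ↔ c ∈ al := by
  rw [PySem.Chars.isIn_iff_infix]
  exact List.singleton_infix_iff c al

theorem pv_loop1_eq (al : List Char) (is : List Int) :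
    identifier_check_loop1 al is =
      if is.any (fun i => PySem.Chars.isIn [PySem.List.pyGetD istenmeyen_karakter.toList i ' '] al)
      then some false
      else identifier_check_loop2 al (PySem.List.pyRange 0 (PySem.Str.len istenen_karakter) 1) := by
  induction is with
  | nil => simp [identifier_check_loop1]
  | cons i rest ih =>
    simp only [identifier_check_loop1, List.any_cons]
    by_cases h : PySem.Chars.isIn [PySem.List.pyGetD istenmeyen_karakter.toList i ' '] al = true
    · simp [h]
    · simp [h, ih]

theorem pv_loop2_eq (al : List Char) (is : List Int) :
    identifier_check_loop2 al is =
      if is.any (fun i =>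
          PySem.Chars.isIn [PySem.List.pyGetD istenen_karakter.toList i ' '] al
          || PySem.Chars.isIn (PySem.Chars.lower [PySem.List.pyGetD istenen_karakter.toList i ' ']) al
          || PySem.Chars.isIn ['_'] al)
      then some true else none := by
  induction is with
  | nil => simp [identifier_check_loop2]
  | cons i rest ih =>
    simp only [identifier_check_loop2, List.any_cons]
    by_cases h : (PySem.Chars.isIn [PySem.List.pyGetD istenen_karakter.toList i ' '] al
          || PySem.Chars.isIn (PySem.Chars.lower [PySem.List.pyGetD istenen_karakter.toList i ' ']) al
          || PySem.Chars.isIn ['_'] al) = true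
    · simp [h]
    · simp [h, ih]

-- any over range(len(L)) of p(L[i]) is any over L of p
theorem pv_any_range (L : List Char) (p : Char → Bool) :
    (PySem.List.pyRange 0 (PySem.List.len L) 1).any (fun i => p (PySem.List.pyGetD L i ' ')) = L.any p := by
  have h := PySem.List.map_pyGetD_pyRange_zero L ' '
  calc (PySem.List.pyRange 0 (PySem.List.len L) 1).any (fun i => p (PySem.List.pyGetD L i ' '))
      = ((PySem.List.pyRange 0 (PySem.List.len L) 1).map (fun j => PySem.List.pyGetD L j ' ')).any p := by
        rw [List.any_map]; rfl
    _ = L.any p := by rw [h]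

-- Set-intersection emptiness as an existential
theorem pv_inter_len (al : List Char) (T : PySem.Set Char) :
    PySem.Set.len (PySem.Set.inter (PySem.Set.ofList al) T) ≠ 0 ↔
      ∃ c ∈ al, c ∈ T := by
  unfold PySem.Set.len
  constructor
  · intro h
    have : PySem.Set.inter (PySem.Set.ofList al) T ≠ [] := by
      intro hnil; rw [hnil] at h; simp at h
    obtain ⟨c, hc⟩ := List.exists_mem_of_ne_nil _ this
    rw [PySem.Set.mem_inter, PySem.Set.mem_ofList] at hc
    exact ⟨c, hc.1, hc.2⟩
  · rintro ⟨c, hal, hF⟩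
    have hc : c ∈ PySem.Set.inter (PySem.Set.ofList al) T := by
      rw [PySem.Set.mem_inter, PySem.Set.mem_ofList]; exact ⟨hal, hF⟩
    intro h
    have : (PySem.Set.inter (PySem.Set.ofList al) T) = [] := by
      cases hl : PySem.Set.inter (PySem.Set.ofList al) T with
      | nil => rfl
      | cons x xs => rw [hl] at h; simp at h; omega
    rw [this] at hc; simp at hc
  
-- the forbidden scan of A hits iff some character of a is in B's forbidden set
theorem pv_forbidden_iff (al : List Char) :
    (istenmeyen_karakter.toList.any (fun c => PySem.Chars.isIn [c] al)) = true ↔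
      ∃ c ∈ al, c ∈ pvForbidden := by
  rw [List.any_eq_true]
  constructor
  · rintro ⟨c, hcL, hin⟩
    refine ⟨c, (pv_isIn_singleton c al).mp hin, ?_⟩
    exact pvF1 c hcL
  · rintro ⟨c, hal, hF⟩
    exact ⟨c, pvF2 c hF, (pv_isIn_singleton c al).mpr hal⟩

-- under 'no forbidden character in a', the allowed scan of A hits iff some character
-- of a is in B's allowed set
theorem pv_allowed_iff (al : List Char) (hF : ¬ ∃ c ∈ al, c ∈ pvForbidden) :
    (istenen_karakter.toList.any (fun c =>
        PySem.Chars.isIn [c] al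
        || PySem.Chars.isIn (PySem.Chars.lower [c]) al
        || PySem.Chars.isIn ['_'] al)) = true ↔
      ∃ c ∈ al, c ∈ pvAllowed := by
  rw [List.any_eq_true]
  constructor
  · rintro ⟨c, hcL, hin⟩
    rw [Bool.or_eq_true, Bool.or_eq_true] at hin
    rcases hin with (h1 | h2) | h3
    · have hc : c ∈ al := (pv_isIn_singleton c al).mp h1
      rcases pvF3 c hcL with rfl | hA
      · exact absurd ⟨',', hc, by rw [pv_lit_forb]; decide⟩ hF
      · exact ⟨c, hc, hA⟩
    · have hc : PySem.Chars.lowerChar c ∈ al := by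
        have : PySem.Chars.lower [c] = [PySem.Chars.lowerChar c] := rfl
        rw [this] at h2
        exact (pv_isIn_singleton _ al).mp h2
      rcases pvF4 c hcL with rfl | hA
      · exact absurd ⟨',', by simpa using hc, by rw [pv_lit_forb]; decide⟩ hF
      · exact ⟨_, hc, hA⟩
    · exact ⟨'_', (pv_isIn_singleton _ al).mp h3, by rw [pv_lit_allow]; decide⟩
  · rintro ⟨c, hal, hA⟩
    rcases pvF5 c hA with rfl | hup | ⟨u, huL, hlo⟩
    · exact ⟨'A', by rw [pv_lit_ist]; decide, by
        simp [Bool.or_eq_true]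
        exact Or.inr ((pv_isIn_singleton '_' al).mpr hal)⟩
    · exact ⟨c, hup, by
        simp [Bool.or_eq_true]
        exact Or.inl (Or.inl ((pv_isIn_singleton c al).mpr hal))⟩
    · refine ⟨u, huL, ?_⟩
      simp only [Bool.or_eq_true]
      have : PySem.Chars.lower [u] = [PySem.Chars.lowerChar u] := rfl
      rw [this, hlo]
      exact Or.inl (Or.inr ((pv_isIn_singleton c al).mpr hal))

-- ===== VERDICT (by name: the statement is the Claim_ definition above) =====
theorem identifier_check_spec : Claim_equal_identifier_check := by
  intro a _hDom hPre
  unfold Spec_identifier_check identifier_check identifier_check_alt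
  have hne : a.toList ≠ [] := fun h0 => hPre (String.toList_eq_nil_iff.mp h0)
  cases hl : a.toList with
  | nil => exact absurd hl hne
  | cons c0 rest =>
  have hget : PySem.Str.pyGet? a 0 = some c0 := by
    simp [hl]
  rw [hget]
  dsimp only
  by_cases hguard : (c0 = '_' || PySem.Chars.strIsalpha [c0]) = true
  · -- guard passes: run the loops
    rw [if_pos hguard]
    have hguard' : (c0 ≠ '_' && !PySem.Chars.strIsalpha [c0]) = false := by
      rcases Bool.or_eq_true _ _ |>.mp hguard with h | h
      · simp [h]
      · simp [h]
    rw [hguard']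
    simp only [Bool.false_eq_true, if_false]
    rw [pv_loop1_eq]
    have hlen1 : PySem.Str.len istenmeyen_karakter = PySem.List.len istenmeyen_karakter.toList := by
      simp [PySem.Str.len_eq, PySem.List.len_eq]
    have hlen2 : PySem.Str.len istenen_karakter = PySem.List.len istenen_karakter.toList := by
      simp [PySem.Str.len_eq, PySem.List.len_eq]
    rw [hlen1, pv_any_range istenmeyen_karakter.toList (fun c => PySem.Chars.isIn [c] (c0 :: rest))]
    by_cases hF : ∃ c ∈ c0 :: rest, c ∈ pvForbidden
    · rw [if_pos ((pv_forbidden_iff _).mpr hF)]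
      rw [if_pos ((pv_inter_len _ _).mpr hF)]
    · rw [if_neg (by rw [pv_forbidden_iff]; exact hF)]
      rw [if_neg (fun hcon => hF ((pv_inter_len _ _).mp hcon))]
      rw [pv_loop2_eq, hlen2, pv_any_range istenen_karakter.toList (fun c =>
          PySem.Chars.isIn [c] (c0 :: rest)
          || PySem.Chars.isIn (PySem.Chars.lower [c]) (c0 :: rest)
          || PySem.Chars.isIn ['_'] (c0 :: rest))]
      by_cases hA : ∃ c ∈ c0 :: rest, c ∈ pvAllowed
      · rw [if_pos ((pv_allowed_iff _ hF).mpr hA)]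
        rw [if_pos ((pv_inter_len _ _).mpr hA)]
      · rw [if_neg (by rw [pv_allowed_iff _ hF]; exact hA)]
        rw [if_neg (fun hcon => hA ((pv_inter_len _ _).mp hcon))]
  · -- guard fails: both return False
    rw [if_neg hguard]
    have hg : ¬ (c0 = '_' ∨ PySem.Chars.strIsalpha [c0] = true) := by
      simpa [Bool.or_eq_true, decide_eq_true_eq] using hguard
    rw [not_or] at hg
    rw [if_pos (by simp [hg.1, hg.2])]
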